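-- pv_equiv track=rewrite | github.com/mdruchek/Python_Basic | Module18/10_the_truth/main.py | dividing_into_lines
-- ===== SOURCE A (Python) =====
-- def dividing_into_lines(_list):
--     temp_list = ['\n']
--     two_dimensional_list = []
--     for word in _list:
--         temp_list.append(word)
--         if ('.' in word or '!' in word) and _list.index(word) != 0:
--             two_dimensional_list.append(temp_list)
--             temp_list = ['\n']
--     return two_dimensional_list
-- ===== SOURCE B (Python) =====
-- def dividing_into_lines(_list):
--     boundaries = [i for i, w in enumerate(_list)
--                   if ('.' in w or '!' in w) and i != 0]
--     result = []
--     start = 0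
--     for i in boundaries:
--         result.append(['\n'] + _list[start:i + 1])
--         start = i + 1
--     return result
-- ===== Notes on version B (the rewrite author's own statement) =====
-- stated objective: alternative
-- what changed: B replaces A's single append-as-you-go loop with a mutable accumulator by a two-phase algorithm: one pass collecting the boundary indices (a non-initial word containing '.' or '!'), then emitting each line as a slice between consecutive boundaries.
-- intended difference: On lists whose first word contains '.' or '!' and occurs again later, A's value-based _list.index(word) != 0 test never fires on those later duplicates so A silently skips those sentence ends, while B ends a line at every non-initial word containing '.' or '!' (the plainly intended 'not the first word' test). — e.g. on dividing_into_lines(["a.", "a."]): A returns [], B returns [["\n", "a.", "a."]]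
import Mathlib
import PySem

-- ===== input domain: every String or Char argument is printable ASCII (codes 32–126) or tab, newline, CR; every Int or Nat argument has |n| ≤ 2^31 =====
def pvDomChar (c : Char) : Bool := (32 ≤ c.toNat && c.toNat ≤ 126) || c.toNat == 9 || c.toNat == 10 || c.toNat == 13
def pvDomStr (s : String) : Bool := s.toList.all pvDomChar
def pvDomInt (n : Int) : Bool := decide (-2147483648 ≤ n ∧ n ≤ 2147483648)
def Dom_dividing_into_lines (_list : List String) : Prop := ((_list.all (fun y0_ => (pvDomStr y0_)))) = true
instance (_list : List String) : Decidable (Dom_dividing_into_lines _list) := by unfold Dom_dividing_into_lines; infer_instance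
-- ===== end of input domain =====

-- B collects the boundary indices (non-initial words containing '.' or '!') in one pass
-- and then slices the list between consecutive boundaries, instead of A's
-- append-as-you-go accumulator loop with its repeated _list.index scans.

-- ===== PORT A =====
def dividing_into_lines (_list : List String) : List (List String) :=
  (_list.foldl
    (fun (st : List String × List (List String)) word =>
      let temp_list := st.1 ++ [word]
      if (PySem.Str.isIn "." word || PySem.Str.isIn "!" word)
          && decide (PySem.List.index? _list word ≠ some 0)
      then (["\n"], st.2 ++ [temp_list])
      else (temp_list, st.2))
    (["\n"], [])).2

-- ===== PORT B =====
def dividing_into_lines_alt (_list : List String) : List (List String) :=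
  let boundaries :=
    ((PySem.List.enumerate _list 0).filter
      (fun p => (PySem.Str.isIn "." p.2 || PySem.Str.isIn "!" p.2)
        && decide (p.1 ≠ 0))).map (·.1)
  (boundaries.foldl
    (fun (st : List (List String) × Int) i =>
      (st.1 ++ [["\n"] ++ PySem.List.slice _list (some st.2) (some (i + 1))], i + 1))
    ([], 0)).1

-- ===== PRECONDITION & SPEC =====
-- On lists whose first word contains '.' or '!' and occurs again later, A's value-based
-- _list.index(word) != 0 test never fires on those later duplicates so A silently skips
-- those sentence ends, while B ends a line at every non-initial word containing '.' or '!'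
-- (the plainly intended 'not the first word' test).
def D_dividing_into_lines (_list : List String) : Prop :=
  _list ≠ [] ∧
  ((PySem.Str.isIn "." _list.headI || PySem.Str.isIn "!" _list.headI) = true) ∧
  _list.headI ∈ _list.tail
instance (_list : List String) : Decidable (D_dividing_into_lines _list) := by
  unfold D_dividing_into_lines; infer_instance

def Spec_dividing_into_lines (_list : List String) (out : List (List String)) : Prop :=
  ¬ D_dividing_into_lines _list → out = dividing_into_lines_alt _list
instance (_list : List String) (out : List (List String)) : Decidable (Spec_dividing_into_lines _list out) := by
  unfold Spec_dividing_into_lines; infer_instance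

def pvDiffWitness_dividing_into_lines : List String := ["a.", "a."]
def pvDiffWitnessOut_dividing_into_lines : (List (List String)) × (List (List String)) :=
  ([], [["\n", "a.", "a."]])

-- ===== CLAIM (what is proved, stated in full; the proofs are below) =====
def Claim_unchanged_dividing_into_lines : Prop :=
  ∀ (_list : List String), Dom_dividing_into_lines _list →
    Spec_dividing_into_lines _list (dividing_into_lines _list)
def Claim_changed_dividing_into_lines : Prop :=
  Dom_dividing_into_lines (pvDiffWitness_dividing_into_lines) ∧
  D_dividing_into_lines (pvDiffWitness_dividing_into_lines) ∧
  dividing_into_lines (pvDiffWitness_dividing_into_lines) = pvDiffWitnessOut_dividing_into_lines.1 ∧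
  dividing_into_lines_alt (pvDiffWitness_dividing_into_lines) = pvDiffWitnessOut_dividing_into_lines.2 ∧
  pvDiffWitnessOut_dividing_into_lines.1 ≠ pvDiffWitnessOut_dividing_into_lines.2
def Claim_exact_dividing_into_lines : Prop :=
  ∀ (_list : List String), Dom_dividing_into_lines _list → D_dividing_into_lines _list →
    dividing_into_lines _list ≠ dividing_into_lines_alt _list

-- ===== LEMMAS AND PROOFS =====

-- The common specification: split the word list after each word whose position/value
-- satisfies d (position counted from k), with the accumulated (unfinished) group pre;
-- the trailing group is dropped.
def pvSplit (d : Nat → String → Bool) (pre : List String) (k : Nat) : List String → List (List String)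
  | [] => []
  | w :: ws =>
      if d k w then (pre ++ [w]) :: pvSplit d ["\n"] (k + 1) ws
      else pvSplit d (pre ++ [w]) (k + 1) ws

theorem pvFoldA (c : String → Bool) (ys : List String) :
    ∀ (pre : List String) (acc : List (List String)) (k : Nat),
    (ys.foldl
      (fun (st : List String × List (List String)) word =>
        let temp_list := st.1 ++ [word]
        if c word then (["\n"], st.2 ++ [temp_list])
        else (temp_list, st.2))
      (pre, acc)).2 = acc ++ pvSplit (fun _ w => c w) pre k ys := by
  induction ys with
  | nil => intro pre acc k; simp [pvSplit]
  | cons w ws ih =>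
      intro pre acc k
      simp only [List.foldl_cons, pvSplit]
      by_cases h : c w
      · simp [h, ih _ _ (k + 1)]
      · simp [h, ih _ _ (k + 1)]

-- chunks of L delimited by the boundary index list, starting at position s
def pvChunks (L : List String) (s : Int) : List Int → List (List String)
  | [] => []
  | i :: bs => (["\n"] ++ PySem.List.slice L (some s) (some (i + 1))) :: pvChunks L (i + 1) bs

theorem pvFoldB (L : List String) (bs : List Int) :
    ∀ (acc : List (List String)) (s : Int),
    (bs.foldl
      (fun (st : List (List String) × Int) i =>
        (st.1 ++ [["\n"] ++ PySem.List.slice L (some st.2) (some (i + 1))], i + 1))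
      (acc, s)).1 = acc ++ pvChunks L s bs := by
  induction bs with
  | nil => intro acc s; simp [pvChunks]
  | cons i bs ih =>
      intro acc s
      simp only [List.foldl_cons]
      rw [ih]
      simp [pvChunks]

theorem pvSliceSnoc (L : List String) (s k : Nat) (hs : s ≤ k) (hk : k < L.length) :
    PySem.List.slice L (some (s : Int)) (some (k : Int)) ++ [L[k]] =
    PySem.List.slice L (some (s : Int)) (some ((k : Int) + 1)) := by
  have : ((k : Int) + 1) = ((k + 1 : Nat) : Int) := by push_cast; ring
  rw [this, PySem.List.slice_natCast, PySem.List.slice_natCast]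
  have hks : k + 1 - s = (k - s) + 1 := by omega
  rw [hks, List.take_add_one]
  have hlt : k - s < (L.drop s).length := by simp [List.length_drop]; omega
  have : (L.drop s)[k - s]? = some L[k] := by
    rw [List.getElem?_eq_getElem hlt]
    congr 1
    rw [List.getElem_drop]
    congr 1
    omega
  simp [this]

-- boundary indices of the suffix 'ys = L.drop k', enumerated from k, turned into chunks
theorem pvMain (L : List String) (d : Int → String → Bool) (ys : List String) :
    ∀ (s k : Nat), s ≤ k → ys = L.drop k →
    pvChunks L (s : Int)
      (((PySem.List.enumerate ys (k : Int)).filter (fun p => d p.1 p.2)).map (·.1)) =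
    pvSplit (fun n w => d (n : Int) w) (["\n"] ++ PySem.List.slice L (some (s : Int)) (some (k : Int))) k ys := by
  induction ys with
  | nil => intro s k _ _; simp [pvChunks, pvSplit, PySem.List.enumerate_nil]
  | cons w ws ih =>
      intro s k hsk hdrop
      have hk : k < L.length := by
        by_contra h
        rw [List.drop_eq_nil_of_le (by omega)] at hdrop
        exact absurd hdrop (by simp)
      have hcons : L[k] :: L.drop (k+1) = w :: ws := by
        rw [List.getElem_cons_drop hk, ← hdrop]
      have hw : w = L[k] := ((List.cons.injEq _ _ _ _ ▸ hcons).1).symm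
      have hws : ws = L.drop (k + 1) := ((List.cons.injEq _ _ _ _ ▸ hcons).2).symm
      rw [PySem.List.enumerate_cons]
      by_cases h : d (k : Int) w
      · simp only [List.filter_cons, h, if_true, List.map_cons, pvChunks, pvSplit]
        congr 1
        · rw [← pvSliceSnoc L s k hsk hk, hw]; simp
        · have := ih (k + 1) (k + 1) (le_refl _) (by exact_mod_cast hws)
          have hcast : ((k + 1 : Nat) : Int) = (k : Int) + 1 := by push_cast; ring
          rw [hcast] at this
          rw [this]
          have hnil : PySem.List.slice L (some ((k : Int) + 1)) (some ((k : Int) + 1)) = [] := by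
            rw [← hcast, PySem.List.slice_natCast]; simp
          rw [hnil]
          simp
      · simp only [List.filter_cons, h, Bool.false_eq_true, if_false, pvSplit]
        have := ih s (k + 1) (by omega) (by exact_mod_cast hws)
        have hcast : ((k + 1 : Nat) : Int) = (k : Int) + 1 := by push_cast; ring
        rw [hcast] at this
        rw [this, ← pvSliceSnoc L s k hsk hk, hw]
        simp

-- pvSplit only looks at the predicate at the actual (position, element) pairs
theorem pvSplitCongr (d1 d2 : Nat → String → Bool) (ys : List String) :
    ∀ (k : Nat) (pre : List String),
    (∀ n (h : n < ys.length), d1 (k + n) ys[n] = d2 (k + n) ys[n]) →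
    pvSplit d1 pre k ys = pvSplit d2 pre k ys := by
  induction ys with
  | nil => intro k pre _; simp [pvSplit]
  | cons w ws ih =>
      intro k pre hagree
      have h0 : d1 k w = d2 k w := by simpa using hagree 0 (by simp)
      have htail : ∀ n (h : n < ws.length), d1 (k + 1 + n) ws[n] = d2 (k + 1 + n) ws[n] := by
        intro n h
        have hk : k + 1 + n = k + (n + 1) := by omega
        rw [hk]
        simpa using hagree (n + 1) (by simpa using Nat.succ_lt_succ h)
      simp only [pvSplit, h0]
      by_cases h : d2 k w
      · rw [if_pos h, if_pos h, ih (k + 1) ["\n"] htail]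
      · rw [if_neg h, if_neg h, ih (k + 1) (pre ++ [w]) htail]

-- length of pvSplit does not depend on pre, and is monotone / strictly monotone in d
theorem pvSplitLenMono (d1 d2 : Nat → String → Bool) (ys : List String) :
    ∀ (k : Nat) (pre1 pre2 : List String),
    (∀ n (h : n < ys.length), d1 (k + n) ys[n] = true → d2 (k + n) ys[n] = true) →
    (pvSplit d1 pre1 k ys).length ≤ (pvSplit d2 pre2 k ys).length := by
  induction ys with
  | nil => intro k _ _ _; simp [pvSplit]
  | cons w ws ih =>
      intro k pre1 pre2 himp
      have h0 : d1 k w = true → d2 k w = true := by simpa using himp 0 (by simp)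
      have htail : ∀ n (h : n < ws.length), d1 (k + 1 + n) ws[n] = true → d2 (k + 1 + n) ws[n] = true := by
        intro n h
        have hk : k + 1 + n = k + (n + 1) := by omega
        rw [hk]
        simpa using himp (n + 1) (by simpa using Nat.succ_lt_succ h)
      simp only [pvSplit]
      by_cases h1 : d1 k w
      · rw [if_pos h1, if_pos (h0 h1)]
        simpa using ih (k + 1) ["\n"] ["\n"] htail
      · rw [if_neg h1]
        by_cases h2 : d2 k w
        · rw [if_pos h2]
          calc (pvSplit d1 (pre1 ++ [w]) (k+1) ws).length
              ≤ (pvSplit d2 ["\n"] (k+1) ws).length := ih (k + 1) _ _ htail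
            _ ≤ ((pre2 ++ [w]) :: pvSplit d2 ["\n"] (k+1) ws).length := by
                rw [List.length_cons]; exact Nat.le_succ _
        · rw [if_neg h2]
          exact ih (k + 1) _ _ htail

theorem pvSplitLenStrict (d1 d2 : Nat → String → Bool) (ys : List String) :
    ∀ (k : Nat) (pre1 pre2 : List String),
    (∀ n (h : n < ys.length), d1 (k + n) ys[n] = true → d2 (k + n) ys[n] = true) →
    (∃ n, ∃ (h : n < ys.length), d2 (k + n) ys[n] = true ∧ d1 (k + n) ys[n] = false) →
    (pvSplit d1 pre1 k ys).length < (pvSplit d2 pre2 k ys).length := by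
  induction ys with
  | nil => intro k _ _ _ hex; obtain ⟨n, h, _⟩ := hex; simp at h
  | cons w ws ih =>
      intro k pre1 pre2 himp hex
      have h0 : d1 k w = true → d2 k w = true := by simpa using himp 0 (by simp)
      have htail : ∀ n (h : n < ws.length), d1 (k + 1 + n) ws[n] = true → d2 (k + 1 + n) ws[n] = true := by
        intro n h
        have hk : k + 1 + n = k + (n + 1) := by omega
        rw [hk]
        simpa using himp (n + 1) (by simpa using Nat.succ_lt_succ h)
      simp only [pvSplit]
      obtain ⟨n, hn, hd2, hd1⟩ := hex
      cases n with
      | zero =>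
          simp only [List.getElem_cons_zero, Nat.add_zero] at hd1 hd2
          rw [if_neg (by simp [hd1]), if_pos hd2]
          calc (pvSplit d1 (pre1 ++ [w]) (k+1) ws).length
              ≤ (pvSplit d2 ["\n"] (k+1) ws).length := pvSplitLenMono d1 d2 ws (k+1) _ _ htail
            _ < ((pre2 ++ [w]) :: pvSplit d2 ["\n"] (k+1) ws).length := by
                rw [List.length_cons]; exact Nat.lt_succ_self _
      | succ m =>
          have hm : m < ws.length := by simpa using hn
          have hget : (w :: ws)[m + 1] = ws[m] := by simp
          rw [hget] at hd1 hd2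
          have hkm : k + (m + 1) = k + 1 + m := by omega
          rw [hkm] at hd1 hd2
          have hextail : ∃ n, ∃ (h : n < ws.length), d2 (k + 1 + n) ws[n] = true ∧ d1 (k + 1 + n) ws[n] = false :=
            ⟨m, hm, hd2, hd1⟩
          by_cases h1 : d1 k w
          · rw [if_pos h1, if_pos (h0 h1)]
            simpa using ih (k + 1) ["\n"] ["\n"] htail hextail
          · rw [if_neg h1]
            by_cases h2 : d2 k w
            · rw [if_pos h2]
              calc (pvSplit d1 (pre1 ++ [w]) (k+1) ws).length
                  < (pvSplit d2 ["\n"] (k+1) ws).length := ih (k + 1) _ _ htail hextail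
                _ ≤ ((pre2 ++ [w]) :: pvSplit d2 ["\n"] (k+1) ws).length := by
                    rw [List.length_cons]; exact Nat.le_succ _
            · rw [if_neg h2]
              exact ih (k + 1) _ _ htail hextail

-- A's predicate (over positions of L) and B's predicate
def pvPredA (L : List String) : Nat → String → Bool :=
  fun _ w => (PySem.Str.isIn "." w || PySem.Str.isIn "!" w)
    && decide (PySem.List.index? L w ≠ some 0)
def pvPredB : Nat → String → Bool :=
  fun n w => (PySem.Str.isIn "." w || PySem.Str.isIn "!" w)
    && decide ((n : Int) ≠ 0)

-- reduce both ports to pvSplit over the whole list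
theorem pvA_eq (L : List String) :
    dividing_into_lines L = pvSplit (pvPredA L) ["\n"] 0 L := by
  unfold dividing_into_lines
  rw [pvFoldA (fun word => (PySem.Str.isIn "." word || PySem.Str.isIn "!" word)
        && decide (PySem.List.index? L word ≠ some 0)) L ["\n"] [] 0]
  rfl

theorem pvB_eq (L : List String) :
    dividing_into_lines_alt L = pvSplit pvPredB ["\n"] 0 L := by
  have hmain := pvMain L
    (fun i w => (PySem.Str.isIn "." w || PySem.Str.isIn "!" w) && decide (i ≠ 0))
    L 0 0 (le_refl 0) (by simp)
  simp only [Nat.cast_zero] at hmain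
  have hnil : PySem.List.slice L (some (0 : Int)) (some (0 : Int)) = [] := by
    have h0 : (0 : Int) = ((0 : Nat) : Int) := by norm_num
    rw [h0, PySem.List.slice_natCast]; simp
  rw [hnil] at hmain
  simp only [List.append_nil] at hmain
  unfold dividing_into_lines_alt
  rw [pvFoldB L (((PySem.List.enumerate L 0).filter
      (fun p => (PySem.Str.isIn "." p.2 || PySem.Str.isIn "!" p.2)
        && decide (p.1 ≠ 0))).map (·.1)) [] 0]
  simp only [List.nil_append]
  exact hmain

-- A's predicate implies B's at each position
theorem pvPredImp (x : String) (xs : List String) (n : Nat) (hn : n < (x :: xs).length) :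
    pvPredA (x :: xs) n (x :: xs)[n] = true → pvPredB n (x :: xs)[n] = true := by
  intro h
  simp only [pvPredA, Bool.and_eq_true, decide_eq_true_eq] at h
  obtain ⟨hcond, hidx⟩ := h
  simp only [pvPredB, Bool.and_eq_true, decide_eq_true_eq]
  refine ⟨hcond, ?_⟩
  intro hn0
  have : n = 0 := by exact_mod_cast hn0
  subst this
  simp only [List.getElem_cons_zero] at hidx
  exact hidx (PySem.List.index?_cons_self ..)

-- ===== VERDICT (by name: the statements are the Claim_ definitions above) =====
theorem dividing_into_lines_spec : Claim_unchanged_dividing_into_lines := by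
  intro L _ hD
  show dividing_into_lines L = dividing_into_lines_alt L
  rw [pvA_eq, pvB_eq]
  cases L with
  | nil => rfl
  | cons x xs =>
      have hD' : ¬(((PySem.Str.isIn "." x || PySem.Str.isIn "!" x) = true) ∧ x ∈ xs) := by
        intro hcontr
        exact hD ⟨List.cons_ne_nil x xs, hcontr.1, hcontr.2⟩
      apply pvSplitCongr
      intro n hn
      simp only [pvPredA, pvPredB]
      cases n with
      | zero =>
          simp only [List.getElem_cons_zero]
          have h : PySem.List.index? (x :: xs) x = some 0 := PySem.List.index?_cons_self ..
          simp only [PySem.List.index?_eq_idxOf?] at h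
          simp [h]
      | succ m =>
          have hm : m < xs.length := by simpa using hn
          have hget : (x :: xs)[m + 1] = xs[m] := by simp
          rw [hget]
          by_cases hc : (PySem.Str.isIn "." xs[m] || PySem.Str.isIn "!" xs[m]) = true
          · rw [hc]
            simp only [Bool.true_and]
            by_cases hx : xs[m] = x
            · exact absurd ⟨hx ▸ hc, hx ▸ List.getElem_mem hm⟩ hD'
            · have hidx : PySem.List.index? (x :: xs) xs[m]
                  = (PySem.List.index? xs xs[m]).map (· + 1) :=
                PySem.List.index?_cons_of_ne xs (fun he => hx (Eq.symm he))
              have h1 : PySem.List.index? (x :: xs) xs[m] ≠ some 0 := by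
                rw [hidx]; cases PySem.List.index? xs xs[m] <;> simp
              simp only [PySem.List.index?_eq_idxOf?] at h1
              have h2 : ((m : Int) + 1) ≠ 0 := by omega
              simp [h1, h2]
          · rw [eq_false_of_ne_true hc]
            simp

theorem dividing_into_lines_changed : Claim_changed_dividing_into_lines := by
  unfold Claim_changed_dividing_into_lines; decide

theorem dividing_into_lines_tight : Claim_exact_dividing_into_lines := by
  intro L _ hD
  cases L with
  | nil => exact absurd rfl hD.1
  | cons x xs =>
      have hcond : (PySem.Str.isIn "." x || PySem.Str.isIn "!" x) = true := hD.2.1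
      have hmem : x ∈ xs := hD.2.2
      rw [pvA_eq, pvB_eq]
      intro heq
      have hlen : (pvSplit (pvPredA (x :: xs)) ["\n"] 0 (x :: xs)).length
          = (pvSplit pvPredB ["\n"] 0 (x :: xs)).length := by rw [heq]
      obtain ⟨m, hm, hxm⟩ := List.getElem_of_mem hmem
      have hb : m + 1 < (x :: xs).length := by simpa using Nat.succ_lt_succ hm
      have hstrict : (pvSplit (pvPredA (x :: xs)) ["\n"] 0 (x :: xs)).length
          < (pvSplit pvPredB ["\n"] 0 (x :: xs)).length := by
        apply pvSplitLenStrict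
        · intro n hn
          simpa using pvPredImp x xs n hn
        · refine ⟨m + 1, hb, ?_, ?_⟩
          · have hget : (x :: xs)[m + 1]'hb = xs[m] := by simp
            have hz : ((m : Int) + 1) ≠ 0 := by omega
            have hcond' : PySem.Chars.isIn ['.'] x.toList = true ∨ PySem.Chars.isIn ['!'] x.toList = true := by
              simpa using hcond
            simp [pvPredB, hget, hxm, hz, hcond']
          · have hget : (x :: xs)[m + 1]'hb = xs[m] := by simp
            have h : PySem.List.index? (x :: xs) x = some 0 := PySem.List.index?_cons_self ..
            simp only [PySem.List.index?_eq_idxOf?] at h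
            simp [pvPredA, hget, hxm, h]
      omega
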